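-- pv_equiv track=rewrite | github.com/JohnDPatterson/letter_game_solver | solve_wordle2.py | find_next_word
-- ===== SOURCE A (Python) =====
-- def find_next_word(letter_count,word_list):
--
--     score={}
--
--     for i in range(len(word_list)):
--         w=word_list[i][0:-1]
--         w_list=list(str.lower(w))
--         temp=list(set(w_list))
--         score[word_list[i]]=sum(letter_count[x] for x in temp)
--
--     high_score=max((list(score.values())))
--
--     recommended_words=[k for k,v in score.items() if v == high_score]
--
--     return recommended_words
-- ===== SOURCE B (Python) =====
-- def find_next_word(letter_count, word_list):
--     # One pass with a running maximum: score each distinct word (first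
--     # occurrence order), resetting the result list on a new best score.
--     best = None
--     result = []
--     seen = set()
--     for word in word_list:
--         if word in seen:
--             continue
--         seen.add(word)
--         s = sum(letter_count[c] for c in set(word[:-1].lower()))
--         if best is None or s > best:
--             best = s
--             result = [word]
--         elif s == best:
--             result.append(word)
--     return result
-- ===== Notes on version B (the rewrite author's own statement) =====
-- stated objective: alternative
-- what changed: Replaces A's score-dict construction followed by max() and a filtering comprehension with a single pass over the words that keeps a running best score and resets/extends the result list, using a seen-set to skip duplicate words.
import Mathlib
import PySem

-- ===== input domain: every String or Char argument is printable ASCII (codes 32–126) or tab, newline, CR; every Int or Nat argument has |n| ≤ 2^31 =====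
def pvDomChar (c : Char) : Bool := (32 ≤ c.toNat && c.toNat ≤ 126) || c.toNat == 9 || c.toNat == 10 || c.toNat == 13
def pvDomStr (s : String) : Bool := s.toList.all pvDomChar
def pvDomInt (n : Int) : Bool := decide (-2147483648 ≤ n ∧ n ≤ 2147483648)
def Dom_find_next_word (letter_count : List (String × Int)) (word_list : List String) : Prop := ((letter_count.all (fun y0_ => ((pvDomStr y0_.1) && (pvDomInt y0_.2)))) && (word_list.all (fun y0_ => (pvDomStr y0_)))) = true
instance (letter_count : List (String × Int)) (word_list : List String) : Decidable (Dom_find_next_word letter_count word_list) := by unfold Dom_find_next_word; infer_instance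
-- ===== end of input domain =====

-- B replaces A's build-score-dict / max() / filter-comprehension pipeline by a single pass with a
-- running best score and a seen-set (objective: alternative, same asymptotic cost).

-- ===== PORT A =====
def find_next_word (letter_count : List (String × Int)) (word_list : List String) : List String :=
  let score : PySem.Dict String Int :=
    (PySem.List.pyRange 0 (PySem.List.len word_list)).foldl
      (fun d i =>
        (fun d wi =>
          let w := PySem.List.slice wi.toList (some 0) (some (-1))
          let w_list := PySem.Chars.lower w
          let temp := PySem.Set.ofList w_list
          -- letter_count[x]: total form getD 0; Pre_ guarantees the key is present (Python raises KeyError otherwise)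
          d.insert wi (temp.foldl (fun acc x => acc + PySem.Dict.getD (PySem.Dict.mk letter_count) (String.singleton x) 0) 0))
          d (PySem.List.pyGetD word_list i ""))
      (PySem.Dict.mk [])
  match PySem.List.max? (PySem.Dict.values score) (fun v => v) with
  | none => []  -- Python's max raises ValueError here; Pre_ excludes word_list = []
  | some high_score =>
      ((PySem.Dict.items score).filter (fun kv => kv.2 == high_score)).map (fun kv => kv.1)

-- ===== PORT B =====
def pvScoreB (letter_count : List (String × Int)) (word : String) : Int :=
  -- letter_count[c]: total form getD 0; Pre_ guarantees the key is present (Python raises KeyError otherwise)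
  (PySem.Set.ofList (PySem.Chars.lower word.toList.dropLast)).foldl
    (fun acc c => acc + PySem.Dict.getD (PySem.Dict.mk letter_count) (String.singleton c) 0) 0

def pvStepB (letter_count : List (String × Int))
    (st : PySem.Set String × Option Int × List String) (word : String) :
    PySem.Set String × Option Int × List String :=
  if st.1.contains word then st
  else
    let seen := st.1.add word
    let s := pvScoreB letter_count word
    match st.2.1 with
    | none => (seen, some s, [word])
    | some b =>
        if b < s then (seen, some s, [word])
        else if s == b then (seen, some b, st.2.2 ++ [word])
        else (seen, some b, st.2.2)

def find_next_word_alt (letter_count : List (String × Int)) (word_list : List String) : List String :=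
  (word_list.foldl (pvStepB letter_count) (PySem.Set.empty, none, [])).2.2

-- ===== PRECONDITION & SPEC =====
-- Pre_ excludes exactly the inputs where Python A raises: an empty word_list (ValueError from max)
-- and words whose lowered letters (last character dropped) are missing from letter_count (KeyError).
def Pre_find_next_word (letter_count : List (String × Int)) (word_list : List String) : Prop :=
  word_list ≠ [] ∧
    (word_list.all (fun w =>
      (PySem.Chars.lower w.toList.dropLast).all
        (fun c => (PySem.Dict.get? (PySem.Dict.mk letter_count) (String.singleton c)).isSome))) = true
instance (letter_count : List (String × Int)) (word_list : List String) : Decidable (Pre_find_next_word letter_count word_list) := by unfold Pre_find_next_word; infer_instance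

def pvWitness_find_next_word : (List (String × Int)) × List String :=
  ([("a", 1), ("b", 2)], ["ab!", "b!"])

def Spec_find_next_word (letter_count : List (String × Int)) (word_list : List String) (out : List String) : Prop := out = find_next_word_alt letter_count word_list
instance (letter_count : List (String × Int)) (word_list : List String) (out : List String) : Decidable (Spec_find_next_word letter_count word_list out) := by unfold Spec_find_next_word; infer_instance

-- ===== CLAIM (what is proved, stated in full; the proofs are below) =====
def Claim_equal_find_next_word : Prop := ∀ (letter_count : List (String × Int)) (word_list : List String), Dom_find_next_word letter_count word_list → Pre_find_next_word letter_count word_list → Spec_find_next_word letter_count word_list (find_next_word letter_count word_list)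

-- ===== LEMMAS AND PROOFS =====

-- the result-tracking part of B's step (seen-set stripped away)
def pvStep' (letter_count : List (String × Int)) (st : Option Int × List String) (word : String) :
    Option Int × List String :=
  match st.1 with
  | none => (some (pvScoreB letter_count word), [word])
  | some b =>
      if b < pvScoreB letter_count word then (some (pvScoreB letter_count word), [word])
      else if pvScoreB letter_count word == b then (some b, st.2 ++ [word])
      else (some b, st.2)

-- the distinct fresh words of xs, in order, relative to an already-seen set
def pvPrune (s : PySem.Set String) : List String → List String
  | [] => []
  | w :: t => if s.contains w then pvPrune s t else w :: pvPrune (s.add w) t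

theorem pvB_fold (lc : List (String × Int)) (xs : List String) :
    ∀ (seen : PySem.Set String) (st : Option Int × List String),
      (xs.foldl (pvStepB lc) (seen, st)).2 = (pvPrune seen xs).foldl (pvStep' lc) st := by
  induction xs with
  | nil => intro seen st; simp [pvPrune]
  | cons w t ih =>
    intro seen st
    by_cases h : w ∈ seen
    · simp [pvPrune, h, pvStepB, ih]
    · obtain ⟨b, r⟩ := st
      cases b with
      | none => simp [pvPrune, h, pvStepB, pvStep', ih]
      | some b =>
        simp only [pvPrune, h, if_false, List.foldl_cons]
        by_cases h1 : b < pvScoreB lc w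
        · simp [pvStepB, pvStep', h, h1, ih]
        · by_cases h2 : pvScoreB lc w == b
          · simp [pvStepB, pvStep', h, h1, h2, ih]
          · simp [pvStepB, pvStep', h, h1, h2, ih]

theorem pvFoldAdd (xs : List String) : ∀ s : PySem.Set String,
    List.foldl PySem.Set.add s xs = s ++ pvPrune s xs := by
  induction xs with
  | nil => intro s; simp [pvPrune]
  | cons w t ih =>
    intro s
    by_cases h : w ∈ s
    · simp [pvPrune, h, PySem.Set.add, ih]
    · simp only [pvPrune, h, if_false, List.foldl_cons]
      rw [ih]
      simp [PySem.Set.add, h]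

theorem pvPrune_empty (xs : List String) :
    pvPrune PySem.Set.empty xs = PySem.List.dedup xs := by
  have := pvFoldAdd xs PySem.Set.empty
  simp [PySem.Set.empty] at this
  simp [PySem.List.dedup, PySem.Set.ofList, ← this, PySem.Set.empty]

theorem pvA_items_gen (lc : List (String × Int)) (xs : List String) :
    ∀ (pre : List String),
      (xs.foldl (fun d w => d.insert w (pvScoreB lc w))
          (PySem.Dict.mk (pre.map (fun w => (w, pvScoreB lc w))))).items
        = (pre ++ pvPrune pre xs).map (fun w => (w, pvScoreB lc w)) := by
  induction xs with
  | nil => intro pre; simp [pvPrune]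
  | cons w t ih =>
    intro pre
    have hc : (PySem.Dict.mk (pre.map (fun w => (w, pvScoreB lc w)))).contains w
        = true ↔ w ∈ pre := by
      simp [PySem.Dict.contains]
    by_cases h : w ∈ pre
    · have hins : (PySem.Dict.mk (pre.map (fun w => (w, pvScoreB lc w)))).insert w (pvScoreB lc w)
          = PySem.Dict.mk (pre.map (fun w => (w, pvScoreB lc w))) := by
        simp only [PySem.Dict.insert]
        rw [if_pos (hc.mpr h)]
        congr 1
        rw [List.map_map]
        apply List.map_congr_left
        intro x _
        by_cases hx : x = w
        · subst hx; simp
        · simp [Function.comp, hx]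
      simp only [List.foldl_cons, hins, pvPrune]
      rw [if_pos (by simpa using h)]
      exact ih pre
    · have hins : (PySem.Dict.mk (pre.map (fun w => (w, pvScoreB lc w)))).insert w (pvScoreB lc w)
          = PySem.Dict.mk ((pre ++ [w]).map (fun w => (w, pvScoreB lc w))) := by
        simp only [PySem.Dict.insert]
        rw [if_neg (fun hcc => h (hc.mp hcc))]
        simp
      simp only [List.foldl_cons, hins, pvPrune]
      rw [if_neg (by simpa using h)]
      have := ih (pre ++ [w])
      rw [this]
      have hadd : PySem.Set.add pre w = pre ++ [w] := by
        simp [PySem.Set.add, h]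
      rw [hadd]
      simp

theorem pvA_items (lc : List (String × Int)) (xs : List String) :
    (xs.foldl (fun d w => d.insert w (pvScoreB lc w)) (PySem.Dict.mk [])).items
      = (PySem.List.dedup xs).map (fun w => (w, pvScoreB lc w)) := by
  have h := pvA_items_gen lc xs []
  have h2 : pvPrune ([] : List String) xs = PySem.List.dedup xs := pvPrune_empty xs
  simpa [h2] using h

theorem pvMF (lc : List (String × Int)) (ws : List String) :
    ws.foldl (pvStep' lc) (none, []) =
      match PySem.List.max? (ws.map (pvScoreB lc)) (fun v => v) with
      | none => (none, [])
      | some h => (some h, ws.filter (fun w => pvScoreB lc w == h)) := by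
  induction ws using List.reverseRecOn with
  | nil => simp [PySem.List.max?]
  | append_singleton xs w ih =>
    rw [List.foldl_append]
    cases hm : PySem.List.max? (xs.map (pvScoreB lc)) (fun v => v) with
    | none =>
      have hx : xs = [] := by
        have := (PySem.List.max?_eq_none_iff (xs.map (pvScoreB lc)) (fun v => v)).mp hm
        simpa using this
      subst hx
      simp [pvStep', PySem.List.max?]
    | some m =>
      have hmax : PySem.List.max? ((xs ++ [w]).map (pvScoreB lc)) (fun v => v)
          = some (max m (pvScoreB lc w)) := by
        cases xs with
        | nil => simp [PySem.List.max?] at hm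
        | cons x t =>
          simp only [List.map_cons, PySem.List.max?_id_cons, Option.some.injEq] at hm
          simp only [List.cons_append, List.map_cons, List.map_append,
            PySem.List.max?_id_cons, List.foldl_append, List.foldl_cons, List.foldl_nil,
            List.map_nil, hm]
      simp only [hm] at ih
      rw [ih, hmax]
      have hle : ∀ x ∈ xs, pvScoreB lc x ≤ m := by
        intro x hx
        exact PySem.List.max?_isMax hm _ (List.mem_map_of_mem hx)
      by_cases h1 : m < pvScoreB lc w
      · have hnil : xs.filter (fun x => pvScoreB lc x == pvScoreB lc w) = [] := by
          rw [List.filter_eq_nil_iff]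
          intro x hx hbe
          have h2 := hle x hx
          have h3 : pvScoreB lc x = pvScoreB lc w := by simpa using hbe
          omega
        simp [pvStep', h1, max_eq_right h1.le, List.filter_append, hnil]
      · have hle2 : pvScoreB lc w ≤ m := by omega
        by_cases h2 : pvScoreB lc w = m
        · simp [pvStep', h1, h2, max_eq_left hle2, List.filter_append]
        · simp [pvStep', h1, h2, max_eq_left hle2, List.filter_append]


-- ===== VERDICT (by name: the statement is the Claim_ definition above) =====
theorem find_next_word_spec : Claim_equal_find_next_word := by
  intro lc wl _ _
  unfold Spec_find_next_word find_next_word find_next_word_alt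
  rw [PySem.List.foldl_pyRange_zero_pyGetD wl ""
    (fun (d : PySem.Dict String Int) wi =>
      d.insert wi
        ((PySem.Set.ofList (PySem.Chars.lower (PySem.List.slice wi.toList (some 0) (some (-1))))).foldl
          (fun acc x => acc + PySem.Dict.getD (PySem.Dict.mk lc) (String.singleton x) 0) 0))
    (PySem.Dict.mk [])]
  have hfun : (fun (d : PySem.Dict String Int) wi =>
      d.insert wi
        ((PySem.Set.ofList (PySem.Chars.lower (PySem.List.slice wi.toList (some 0) (some (-1))))).foldl
          (fun acc x => acc + PySem.Dict.getD (PySem.Dict.mk lc) (String.singleton x) 0) 0))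
      = fun (d : PySem.Dict String Int) wi => d.insert wi (pvScoreB lc wi) := by
    funext d wi
    simp [pvScoreB, PySem.List.slice_zero_start, PySem.List.slice_to_neg_one]
  rw [hfun]
  have hB : (wl.foldl (pvStepB lc) (PySem.Set.empty, none, [])).2.2
      = ((PySem.List.dedup wl).foldl (pvStep' lc) (none, [])).2 := by
    rw [show (wl.foldl (pvStepB lc) (PySem.Set.empty, (none, []))).2
          = (pvPrune PySem.Set.empty wl).foldl (pvStep' lc) (none, []) from
        pvB_fold lc wl PySem.Set.empty (none, []), pvPrune_empty]
  rw [hB, pvMF]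
  have hval : PySem.Dict.values
      (wl.foldl (fun d w => d.insert w (pvScoreB lc w)) (PySem.Dict.mk []))
      = (PySem.List.dedup wl).map (pvScoreB lc) := by
    simp [PySem.Dict.values, pvA_items, List.map_map, Function.comp_def]
  simp only [hval]
  cases hm : PySem.List.max? ((PySem.List.dedup wl).map (pvScoreB lc)) (fun v => v) with
  | none => simp
  | some h =>
    simp only [pvA_items, List.filter_map, List.map_map]
    simp [Function.comp_def]
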